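-- pv_equiv track=rewrite | github.com/zkokalj/HLS_small_area_test | HLS/Landsat_8/HLS_L8.py | convert_bit_index
-- ===== SOURCE A (Python) =====
-- def convert_bit_index(x):
--     """
--     Transform x into a bit index
--     """
--     x_string = str(x)
--     sum = 0
--     if x == 6666:#if it is a no-data pixel
--         return 255
--     for i in range(1,6):
--         if str(i) in x_string:
--             sum += 2**i
--     return sum
-- ===== SOURCE B (Python) =====
-- def convert_bit_index(x):
--     if x == 6666:  # no-data pixel guard, kept unchanged
--         return 255
--     weights = {'1': 2, '2': 4, '3': 8, '4': 16, '5': 32}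
--     return sum(weights.get(c, 0) for c in set(str(x)))
-- ===== Notes on version B (the rewrite author's own statement) =====
-- stated objective: idiomatic
-- what changed: Instead of five separate substring searches over str(x), B builds the set of characters of str(x) in one pass and sums a weight-dictionary lookup ({'1':2,...,'5':32}) over that set; the 6666 guard is kept unchanged.
import Mathlib
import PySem

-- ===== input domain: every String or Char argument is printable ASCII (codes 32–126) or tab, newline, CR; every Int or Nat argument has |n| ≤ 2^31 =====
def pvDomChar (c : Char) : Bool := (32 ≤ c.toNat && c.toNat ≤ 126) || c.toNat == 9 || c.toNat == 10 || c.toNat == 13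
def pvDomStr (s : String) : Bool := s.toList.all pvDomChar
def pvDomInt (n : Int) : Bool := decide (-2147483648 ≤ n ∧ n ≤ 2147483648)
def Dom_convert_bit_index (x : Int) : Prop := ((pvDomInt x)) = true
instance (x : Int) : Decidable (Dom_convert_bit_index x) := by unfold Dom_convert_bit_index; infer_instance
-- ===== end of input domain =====

-- B builds set(str(x)) once and sums a weight-dict lookup over it, instead of A's five separate substring scans (objective: idiomatic; same cost).

-- ===== PORT A =====
-- 2**i is ported as 2 ^ i.toNat: every i produced by range(1,6) is positive, so this is exact.
def convert_bit_index (x : Int) : Int :=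
  let x_string := PySem.Int.toStr x
  let sum : Int := 0
  if x = 6666 then 255
  else (PySem.List.pyRange 1 6 1).foldl
    (fun s i => if PySem.Str.isIn (PySem.Int.toStr i) x_string then s + 2 ^ i.toNat else s) sum

-- ===== PORT B =====
def pvWeights : PySem.Dict Char Int :=
  PySem.Dict.ofList [('1', 2), ('2', 4), ('3', 8), ('4', 16), ('5', 32)]

-- sum over set(str(x)) is order-independent (Int addition is commutative), so summing the PySem.Set element list is exact.
def convert_bit_index_alt (x : Int) : Int :=
  if x = 6666 then 255
  else ((PySem.Set.ofList (PySem.Int.toStr x).toList).map (fun c => pvWeights.getD c 0)).sum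

-- ===== PRECONDITION & SPEC =====
def Spec_convert_bit_index (x : Int) (out : Int) : Prop := out = convert_bit_index_alt x
instance (x : Int) (out : Int) : Decidable (Spec_convert_bit_index x out) := by unfold Spec_convert_bit_index; infer_instance

-- ===== CLAIM (what is proved, stated in full; the proofs are below) =====
def Claim_equal_convert_bit_index : Prop := ∀ (x : Int), Dom_convert_bit_index x → Spec_convert_bit_index x (convert_bit_index x)

-- ===== LEMMAS AND PROOFS =====

-- the five digit characters A tests for
def pvDigits : List Char := ['1', '2', '3', '4', '5']

-- the common value both programs compute on a non-6666 input whose str has character list l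
def pvCanon (l : List Char) : Int :=
  (if '1' ∈ l then (2:Int) else 0) + (if '2' ∈ l then 4 else 0) + (if '3' ∈ l then 8 else 0)
    + (if '4' ∈ l then 16 else 0) + (if '5' ∈ l then 32 else 0)

lemma pv_singleton_infix (c : Char) (l : List Char) : [c] <:+: l ↔ c ∈ l := by
  constructor
  · intro h; exact h.subset (List.mem_singleton_self c)
  · intro h
    obtain ⟨a, b, rfl⟩ := List.append_of_mem h
    exact ⟨a, b, by simp⟩

lemma pv_weight_zero (c : Char) (h : c ∉ pvDigits) : pvWeights.getD c 0 = 0 := by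
  have n1 : ('1':Char) ≠ c := fun e => h (by rw [← e]; decide)
  have n2 : ('2':Char) ≠ c := fun e => h (by rw [← e]; decide)
  have n3 : ('3':Char) ≠ c := fun e => h (by rw [← e]; decide)
  have n4 : ('4':Char) ≠ c := fun e => h (by rw [← e]; decide)
  have n5 : ('5':Char) ≠ c := fun e => h (by rw [← e]; decide)
  apply PySem.Dict.getD_of_not_contains
  have hW : pvWeights.items = [('1',(2:Int)), ('2',4), ('3',8), ('4',16), ('5',32)] := by decide
  simp [PySem.Dict.contains, hW, n1, n2, n3, n4, n5]

-- characters outside {'1',…,'5'} contribute 0, so the sum may be restricted to the digit characters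
lemma pv_sum_filter (m : List Char) :
    (m.map (fun c => pvWeights.getD c 0)).sum
      = ((m.filter (fun c => decide (c ∈ pvDigits))).map (fun c => pvWeights.getD c 0)).sum := by
  induction m with
  | nil => rfl
  | cons a t ih =>
    by_cases ha : a ∈ pvDigits
    · simp [ha, ih]
    · simp [ha, ih, pv_weight_zero a ha]

-- the distinct digit characters of l, in either enumeration order, are the same finite set
lemma pv_perm (l : List Char) :
    ((PySem.Set.ofList l).filter (fun c => decide (c ∈ pvDigits))).Perm
      (pvDigits.filter (fun c => decide (c ∈ l))) := by
  rw [List.perm_ext_iff_of_nodup ((PySem.Set.nodup_ofList l).filter _)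
    ((by decide : pvDigits.Nodup).filter _)]
  intro a
  simp only [List.mem_filter, PySem.Set.mem_ofList, decide_eq_true_eq]
  tauto

lemma pv_B_eq (l : List Char) :
    ((PySem.Set.ofList l).map (fun c => pvWeights.getD c 0)).sum = pvCanon l := by
  rw [pv_sum_filter, ((pv_perm l).map (fun c => pvWeights.getD c 0)).sum_eq]
  by_cases m1 : '1' ∈ l <;> by_cases m2 : '2' ∈ l <;> by_cases m3 : '3' ∈ l <;>
    by_cases m4 : '4' ∈ l <;> by_cases m5 : '5' ∈ l <;>
    simp [pvDigits, pvCanon, m1, m2, m3, m4, m5, pvWeights] <;> decide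

lemma pv_A_eq (s : String) :
    (PySem.List.pyRange 1 6 1).foldl
      (fun acc i => if PySem.Str.isIn (PySem.Int.toStr i) s then acc + 2 ^ i.toNat else acc) 0
      = pvCanon s.toList := by
  have hr : PySem.List.pyRange 1 6 1 = [1, 2, 3, 4, 5] := by decide
  have e1 : PySem.Str.isIn (PySem.Int.toStr 1) s = true ↔ '1' ∈ s.toList := by
    rw [PySem.Str.isIn_iff_infix, (by decide : (PySem.Int.toStr 1).toList = ['1'])]
    exact pv_singleton_infix '1' s.toList
  have e2 : PySem.Str.isIn (PySem.Int.toStr 2) s = true ↔ '2' ∈ s.toList := by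
    rw [PySem.Str.isIn_iff_infix, (by decide : (PySem.Int.toStr 2).toList = ['2'])]
    exact pv_singleton_infix '2' s.toList
  have e3 : PySem.Str.isIn (PySem.Int.toStr 3) s = true ↔ '3' ∈ s.toList := by
    rw [PySem.Str.isIn_iff_infix, (by decide : (PySem.Int.toStr 3).toList = ['3'])]
    exact pv_singleton_infix '3' s.toList
  have e4 : PySem.Str.isIn (PySem.Int.toStr 4) s = true ↔ '4' ∈ s.toList := by
    rw [PySem.Str.isIn_iff_infix, (by decide : (PySem.Int.toStr 4).toList = ['4'])]
    exact pv_singleton_infix '4' s.toList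
  have e5 : PySem.Str.isIn (PySem.Int.toStr 5) s = true ↔ '5' ∈ s.toList := by
    rw [PySem.Str.isIn_iff_infix, (by decide : (PySem.Int.toStr 5).toList = ['5'])]
    exact pv_singleton_infix '5' s.toList
  rw [hr]
  simp only [List.foldl, e1, e2, e3, e4, e5]
  by_cases m1 : '1' ∈ s.toList <;> by_cases m2 : '2' ∈ s.toList <;> by_cases m3 : '3' ∈ s.toList <;>
    by_cases m4 : '4' ∈ s.toList <;> by_cases m5 : '5' ∈ s.toList <;>
    simp [pvCanon, m1, m2, m3, m4, m5]

-- ===== VERDICT (by name: the statement is the Claim_ definition above) =====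
theorem convert_bit_index_spec : Claim_equal_convert_bit_index := by
  intro x _
  unfold Spec_convert_bit_index
  by_cases h : x = 6666
  · simp [convert_bit_index, convert_bit_index_alt, h]
  · show convert_bit_index x = convert_bit_index_alt x
    simp only [convert_bit_index, convert_bit_index_alt, if_neg h]
    rw [pv_A_eq (PySem.Int.toStr x), pv_B_eq]
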